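-- pv_equiv track=rewrite | github.com/yuanshuaikang/PSO-MUCP | HUCPM/PSO-MUCP.py | Enum_Cliques
-- ===== SOURCE A (Python) =====
-- def Enum_Cliques(nis, delete):
--     clique = {}
--     for key in nis:
--         if key[0] in delete:
--             continue
--         clique[key] = []
--         flag_list = nis[key].copy()  # 可以优化为直接遍历，避免复制
--
--         while flag_list:
--             current = flag_list.pop(0)  # 移除当前节点
--             Can_key = [current]
--
--             # 优化交集计算：避免重复转换 set 和 list
--             neighbors = set(nis[current])
--             inter = [x for x in flag_list if x in neighbors]
--
--             # 改用迭代DFS代替递归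
--             stack = [(Can_key, inter)]
--             while stack:
--                 can_key, inter = stack.pop()
--                 if not inter:
--                     clique[key].append(can_key)
--                     continue
--                 if len(inter) == 1:
--                     clique[key].append(can_key + [inter[0]])
--                     continue
--
--                 # 避免频繁的列表拷贝
--                 first_elem = inter[0]
--                 new_can_key = can_key + [first_elem]
--                 remaining = inter[1:]
--
--                 # 计算新的交集
--                 new_neighbors = set(nis[first_elem])
--                 new_inter = [x for x in remaining if x in new_neighbors]
--
--                 stack.append((new_can_key, new_inter))
--                 stack.append((can_key, remaining))
--
--     return clique
-- ===== SOURCE B (Python) =====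
-- def _dfs(nis, can, inter):
--     # returns the list of cliques extending `can` by elements of `inter`,
--     # exclude-branch results before include-branch results
--     if len(inter) <= 1:
--         return [can + inter]
--     first, rest = inter[0], inter[1:]
--     nbrs = set(nis[first])
--     return _dfs(nis, can, rest) + _dfs(nis, can + [first], [x for x in rest if x in nbrs])
--
--
-- def _cliques_for(nis, flag):
--     out = []
--     for i, current in enumerate(flag):
--         rest = flag[i + 1:]
--         nbrs = set(nis[current])
--         out.extend(_dfs(nis, [current], [x for x in rest if x in nbrs]))
--     return out
--
--
-- def Enum_Cliques(nis, delete):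
--     deleted = set(delete)
--     return {key: _cliques_for(nis, nis[key])
--             for key in nis
--             if key[0] not in deleted}
-- ===== Notes on version B (the rewrite author's own statement) =====
-- stated objective: alternative
-- what changed: The explicit-stack iterative DFS with a mutable per-key accumulator is replaced by a functional recursive DFS (exclude branch concatenated before include branch) and the pop(0) while-loop over flag_list by a suffix loop, the result built as a dict comprehension.
import Mathlib
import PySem

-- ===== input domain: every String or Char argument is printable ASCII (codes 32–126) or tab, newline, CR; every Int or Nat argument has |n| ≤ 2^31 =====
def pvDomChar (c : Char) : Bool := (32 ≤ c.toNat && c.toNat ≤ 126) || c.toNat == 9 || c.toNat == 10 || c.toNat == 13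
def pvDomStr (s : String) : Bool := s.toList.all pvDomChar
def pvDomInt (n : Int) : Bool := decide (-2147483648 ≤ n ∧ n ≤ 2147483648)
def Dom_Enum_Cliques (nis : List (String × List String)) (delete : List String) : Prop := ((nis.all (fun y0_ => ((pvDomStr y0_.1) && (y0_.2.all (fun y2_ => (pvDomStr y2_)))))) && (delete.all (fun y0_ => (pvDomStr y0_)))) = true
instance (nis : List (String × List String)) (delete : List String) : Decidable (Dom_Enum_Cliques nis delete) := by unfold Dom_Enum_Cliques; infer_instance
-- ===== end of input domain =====

-- B replaces A's explicit-stack iterative DFS and pop(0) loop with a functional recursive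
-- DFS over suffixes (same output order); alternative decomposition, no speed claim.


-- ===== PORT A =====
-- measure for the while-stack loop: each pop either consumes an entry or replaces an
-- entry of inter-length n ≥ 2 by two entries of inter-lengths n-1 and ≤ n-1
def pvMeasureA (stack : List (List String × List String)) : Nat :=
  (stack.map (fun p => 3 ^ p.2.length)).sum

-- A's inner `while stack:` loop; the Python stack pops/pushes at the END of the list,
-- here the stack is kept top-first (head = top), same entries, same order of pops:
-- Python appends new_can_key-branch then can_key-branch, so the can_key (exclude) branch
-- is popped first — here it is consed first.
def pvStackA (d : PySem.Dict String (List String)) (acc : List (List String))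
    (stack : List (List String × List String)) : List (List String) :=
  match stack with
  | [] => acc
  | (can, []) :: rest => pvStackA d (acc ++ [can]) rest
  | (can, [x]) :: rest => pvStackA d (acc ++ [can ++ [x]]) rest
  | (can, first :: r1 :: r2) :: rest =>
      -- `x in set(nis[first_elem])` = list membership (string equality)
      pvStackA d acc ((can, r1 :: r2) ::
        (can ++ [first], (r1 :: r2).filter (fun x => decide (x ∈ d.getD first []))) :: rest)
  termination_by pvMeasureA stack
  decreasing_by
  · simp [pvMeasureA]
  · simp [pvMeasureA]
  · simp only [pvMeasureA, List.map_cons, List.sum_cons]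
    have h2 : 3 ^ ((r1 :: r2).filter (fun x => decide (x ∈ d.getD first []))).length
        ≤ 3 ^ (r1 :: r2).length :=
      Nat.pow_le_pow_right (by omega) (List.length_filter_le _ _)
    have h3 : 1 ≤ 3 ^ (r1 :: r2).length := Nat.one_le_pow _ _ (by omega)
    have h4 : 3 ^ (first :: r1 :: r2).length = 3 * 3 ^ (r1 :: r2).length := by
      rw [List.length_cons, pow_succ]; ring
    omega

-- A's `while flag_list:` loop: current = flag_list.pop(0), inter = remaining ∩ nis[current]
def pvKeyLoopA (d : PySem.Dict String (List String)) (acc : List (List String))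
    (flag : List String) : List (List String) :=
  match flag with
  | [] => acc
  | current :: rest =>
      let inter := rest.filter (fun x => decide (x ∈ d.getD current []))
      pvKeyLoopA d (pvStackA d acc [([current], inter)]) rest

-- `for key in nis: if key[0] in delete: continue; clique[key] = []; …`
-- key[0] on the empty key raises IndexError (the [] branch; excluded by Pre_);
-- `key[0] in delete` compares the 1-char string with each element of delete.
def Enum_Cliques (nis : List (String × List String)) (delete : List String) :
    List (String × List (List String)) :=
  let d := PySem.Dict.ofList nis
  d.keys.foldl (fun cl key =>
    match key.toList with
    | [] => cl
    | c :: _ =>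
        if delete.any (fun s => s.toList == [c]) then cl
        else cl ++ [(key, pvKeyLoopA d [] (d.getD key []))]) []

-- ===== PORT B =====
-- Source B _dfs: len(inter) <= 1 returns [can + inter] (written out as the two list shapes)
def pvDfsB (d : PySem.Dict String (List String)) (can : List String)
    (inter : List String) : List (List String) :=
  match inter with
  | [] => [can]
  | [x] => [can ++ [x]]
  | first :: r1 :: r2 =>
      pvDfsB d can (r1 :: r2) ++
      pvDfsB d (can ++ [first]) ((r1 :: r2).filter (fun x => decide (x ∈ d.getD first [])))
  termination_by inter.length
  decreasing_by
  · simp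
  · simp only [List.length_cons]
    have := List.length_filter_le (fun x => decide (x ∈ d.getD first [])) (r1 :: r2)
    simp only [List.length_cons] at this ⊢; omega

-- Source B _cliques_for: for each suffix position, dfs([current], rest ∩ nis[current])
def pvCliquesForB (d : PySem.Dict String (List String)) (flag : List String) :
    List (List String) :=
  match flag with
  | [] => []
  | current :: rest =>
      pvDfsB d [current] (rest.filter (fun x => decide (x ∈ d.getD current []))) ++
      pvCliquesForB d rest

-- Source B dict comprehension over the non-deleted keys
def Enum_Cliques_alt (nis : List (String × List String)) (delete : List String) :
    List (String × List (List String)) :=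
  let d := PySem.Dict.ofList nis
  d.keys.filterMap (fun key =>
    match key.toList with
    | [] => none
    | c :: _ =>
        if delete.any (fun s => s.toList == [c]) then none
        else some (key, pvCliquesForB d (d.getD key [])))

-- ===== PRECONDITION & SPEC =====
-- Pre_ excludes exactly the inputs where the Python A raises (B raises there too):
-- an empty-string key (IndexError on key[0]), or a non-deleted key listing a
-- neighbour that is not itself a key of nis (KeyError on nis[current]/nis[first_elem]).
def Pre_Enum_Cliques (nis : List (String × List String)) (delete : List String) : Prop :=
  ∀ k ∈ (PySem.Dict.ofList nis).keys, k ≠ "" ∧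
    ((delete.any (fun s => s.toList == k.toList.take 1)) = false →
      ∀ v ∈ (PySem.Dict.ofList nis).getD k [], v ∈ (PySem.Dict.ofList nis).keys)
instance (nis : List (String × List String)) (delete : List String) :
    Decidable (Pre_Enum_Cliques nis delete) := by unfold Pre_Enum_Cliques; infer_instance

def pvWitness_Enum_Cliques : (List (String × List String)) × List String :=
  ([("a", ["b", "c"]), ("b", ["a", "c"]), ("c", ["a", "b"]), ("d", ["a"])], ["d"])

def Spec_Enum_Cliques (nis : List (String × List String)) (delete : List String)
    (out : List (String × List (List String))) : Prop := out = Enum_Cliques_alt nis delete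
instance (nis : List (String × List String)) (delete : List String)
    (out : List (String × List (List String))) : Decidable (Spec_Enum_Cliques nis delete out) := by
  unfold Spec_Enum_Cliques; infer_instance

-- ===== CLAIM (what is proved, stated in full; the proofs are below) =====
def Claim_equal_Enum_Cliques : Prop := ∀ (nis : List (String × List String)) (delete : List String), Dom_Enum_Cliques nis delete → Pre_Enum_Cliques nis delete → Spec_Enum_Cliques nis delete (Enum_Cliques nis delete)

-- ===== LEMMAS AND PROOFS =====

-- the stack machine emits, for each stack entry top-down, exactly the recursive DFS's output
theorem pvStackA_eq (d : PySem.Dict String (List String)) (acc : List (List String))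
    (stack : List (List String × List String)) :
    pvStackA d acc stack = acc ++ (stack.map (fun p => pvDfsB d p.1 p.2)).flatten := by
  fun_induction pvStackA d acc stack with
  | case1 acc => simp
  | case2 acc can rest ih => simp [pvDfsB, ih]
  | case3 acc can x rest ih => simp [pvDfsB, ih]
  | case4 acc can first r1 r2 rest ih =>
      rw [ih]
      simp only [pvDfsB, List.map_cons, List.flatten_cons, List.append_assoc]

theorem pvKeyLoopA_eq (d : PySem.Dict String (List String)) (acc : List (List String))
    (flag : List String) :
    pvKeyLoopA d acc flag = acc ++ pvCliquesForB d flag := by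
  induction flag generalizing acc with
  | nil => simp [pvKeyLoopA, pvCliquesForB]
  | cons current rest ih =>
      simp [pvKeyLoopA, pvCliquesForB, ih, pvStackA_eq, List.append_assoc]

-- the foldl appending one pair per kept key is the filterMap
theorem pvFold_eq (d : PySem.Dict String (List String)) (delete : List String)
    (keys : List String) (cl : List (String × List (List String))) :
    keys.foldl (fun cl key =>
      match key.toList with
      | [] => cl
      | c :: _ =>
          if delete.any (fun s => s.toList == [c]) then cl
          else cl ++ [(key, pvKeyLoopA d [] (d.getD key []))]) cl
    = cl ++ keys.filterMap (fun key =>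
        match key.toList with
        | [] => none
        | c :: _ =>
            if delete.any (fun s => s.toList == [c]) then none
            else some (key, pvCliquesForB d (d.getD key []))) := by
  induction keys generalizing cl with
  | nil => simp
  | cons key rest ih =>
      rw [List.foldl_cons, List.filterMap_cons]
      cases h : key.toList with
      | nil => simp only [h]; exact ih cl
      | cons c cs =>
          simp only [h]
          by_cases hdel : (delete.any fun s => s.toList == [c]) = true
          · simp only [if_pos hdel]; exact ih cl
          · simp only [if_neg hdel]; rw [ih, pvKeyLoopA_eq, List.append_assoc, List.singleton_append, List.nil_append]

-- ===== VERDICT (by name: the statement is the Claim_ definition above) =====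
theorem Enum_Cliques_spec : Claim_equal_Enum_Cliques := by
  intro nis delete _ _
  unfold Spec_Enum_Cliques Enum_Cliques Enum_Cliques_alt
  simp only [pvFold_eq, List.nil_append]
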